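-- pv_equiv track=rewrite | github.com/kmanan/spratt-skills | destination-aware/scripts/destination-daemon.py | _parse_open_reminders
-- ===== SOURCE A (Python) =====
-- def _parse_open_reminders(reminders_text):
--     """Extract open reminder text (stripping '[ ]' and trailing '[tags]')."""
--     out = []
--     for line in (reminders_text or "").split("\n"):
--         if "[ ]" not in line:
--             continue
--         parts = line.split("[ ] ", 1)
--         if len(parts) > 1:
--             out.append(parts[1].split(" [")[0].strip())
--     return out
-- ===== SOURCE B (Python) =====
-- def _parse_open_reminders(reminders_text):
--     """Extract open reminder text by scanning the whole string for '[ ] ' markers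
--     instead of splitting into lines first."""
--     out = []
--     s = reminders_text or ""
--     while True:
--         i = s.find("[ ] ")
--         if i == -1:
--             return out
--         s = s[i + 4:]                       # text after the marker
--         j = s.find("\n")
--         line = s if j == -1 else s[:j]      # capture runs to end of line
--         s = s[len(line):]
--         k = line.find(" [")
--         out.append((line if k == -1 else line[:k]).strip())
-- ===== Notes on version B (the rewrite author's own statement) =====
-- stated objective: alternative
-- what changed: B replaces A's split-into-lines-then-test loop (newline split, substring test, per-line maxsplit-1 split on the open-checkbox marker) by a single forward scan of the whole string that jumps with str.find from one marker occurrence directly to the next, slicing out each capture up to the end of its line.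
import Mathlib
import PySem

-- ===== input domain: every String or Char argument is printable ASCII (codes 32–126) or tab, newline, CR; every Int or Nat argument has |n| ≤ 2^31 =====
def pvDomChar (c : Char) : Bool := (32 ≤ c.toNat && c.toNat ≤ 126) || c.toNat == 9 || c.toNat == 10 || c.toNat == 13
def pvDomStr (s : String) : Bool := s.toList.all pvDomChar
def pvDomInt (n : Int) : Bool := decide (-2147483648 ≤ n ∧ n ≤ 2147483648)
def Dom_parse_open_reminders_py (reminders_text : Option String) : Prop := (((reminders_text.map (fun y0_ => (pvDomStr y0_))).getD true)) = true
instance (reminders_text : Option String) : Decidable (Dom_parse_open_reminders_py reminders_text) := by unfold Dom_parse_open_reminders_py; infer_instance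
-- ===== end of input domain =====

-- B replaces A's per-line split-and-test loop with a single forward scan that jumps
-- from one "[ ] " marker to the next (objective: alternative single-pass algorithm).

-- ===== PORT A =====
-- for line in (reminders_text or "").split("\n"): if "[ ]" not in line: continue;
--   parts = line.split("[ ] ", 1); if len(parts) > 1: out.append(parts[1].split(" [")[0].strip())
def parse_open_reminders_py (reminders_text : Option String) : List String :=
  ((PySem.Str.split? (reminders_text.getD "") "\n").getD []).foldl
    (fun out line =>
      if PySem.Str.isIn "[ ]" line then
        let parts := (PySem.Str.splitMax? line "[ ] " 1).getD []
        if 1 < parts.length then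
          out ++ [PySem.Str.strip
            (((PySem.List.pyGet? ((PySem.Str.split? ((PySem.List.pyGet? parts 1).getD "") " [").getD []) 0).getD ""))]
        else out
      else out) []

-- ===== PORT B =====
-- B's while loop: i = s.find("[ ] "); if i == -1: return out; s = s[i+4:];
--   j = s.find("\n"); line = s if j == -1 else s[:j]; s = s[len(line):];
--   k = line.find(" ["); out.append((line if k == -1 else line[:k]).strip())
-- (ported on the character list; the nonnegative-bound slices s[i+4:], s[:j], s[len(line):], line[:k]
--  are List.drop / List.take, which is exactly Python's slice for in-range nonnegative bounds)
def pvAltLoop (s : List Char) : List String :=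
  let i := PySem.Chars.find s ['[', ' ', ']', ' ']
  if h : i = -1 then []
  else
    let s' := s.drop (i.toNat + 4)
    let j := PySem.Chars.find s' ['\n']
    let line := if j = -1 then s' else s'.take j.toNat
    let k := PySem.Chars.find line [' ', '[']
    String.ofList (PySem.Chars.strip (if k = -1 then line else line.take k.toNat))
      :: pvAltLoop (s'.drop line.length)
termination_by s.length
decreasing_by
  have hinf : ['[', ' ', ']', ' '] <:+: s := by
    by_contra hc
    exact h ((PySem.Chars.find_eq_neg_one_iff s _).mpr hc)
  have h4 : 4 ≤ s.length := by simpa using List.IsInfix.length_le hinf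
  simp only [List.length_drop]
  omega

def parse_open_reminders_py_alt (reminders_text : Option String) : List String :=
  pvAltLoop (reminders_text.getD "").toList

-- ===== PRECONDITION & SPEC =====
def Spec_parse_open_reminders_py (reminders_text : Option String) (out : List String) : Prop := out = parse_open_reminders_py_alt reminders_text
instance (reminders_text : Option String) (out : List String) : Decidable (Spec_parse_open_reminders_py reminders_text out) := by unfold Spec_parse_open_reminders_py; infer_instance

-- ===== CLAIM (what is proved, stated in full; the proofs are below) =====
def Claim_equal_parse_open_reminders_py : Prop := ∀ (reminders_text : Option String), Dom_parse_open_reminders_py reminders_text → Spec_parse_open_reminders_py reminders_text (parse_open_reminders_py reminders_text)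

-- ===== LEMMAS AND PROOFS =====

-- index of the first occurrence of sep in l, as an Option
def pvFirstOcc (sep : List Char) : List Char → Option Nat
  | [] => if sep.isPrefixOf [] then some 0 else none
  | c :: rest => if sep.isPrefixOf (c :: rest) then some 0 else (pvFirstOcc sep rest).map (· + 1)

theorem pvFirstOcc_none_iff (sep l : List Char) : pvFirstOcc sep l = none ↔ ¬ sep <:+: l := by
  induction l with
  | nil =>
    by_cases hs : sep = []
    · subst hs; simp [pvFirstOcc]
    · simp [pvFirstOcc, List.isPrefixOf_iff_prefix, hs]
  | cons c rest ih =>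
    simp only [pvFirstOcc]
    by_cases hp : sep.isPrefixOf (c :: rest)
    · simp [hp, List.isPrefixOf_iff_prefix.mp hp |>.isInfix]
    · have hp' : ¬ sep <+: (c :: rest) := fun hh => hp (List.isPrefixOf_iff_prefix.mpr hh)
      simp [hp, ih, List.infix_cons_iff, hp']

theorem pvFirstOcc_some (sep l : List Char) (k : Nat) (h : pvFirstOcc sep l = some k) :
    sep <+: l.drop k ∧ ∀ j, j < k → ¬ sep <+: l.drop j := by
  induction l generalizing k with
  | nil =>
    simp only [pvFirstOcc] at h
    split at h
    · rename_i hp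
      cases h
      exact ⟨List.isPrefixOf_iff_prefix.mp hp, by omega⟩
    · cases h
  | cons c rest ih =>
    simp only [pvFirstOcc] at h
    split at h
    · rename_i hp
      cases h
      exact ⟨List.isPrefixOf_iff_prefix.mp hp, by omega⟩
    · rename_i hp
      rcases Option.map_eq_some_iff.mp h with ⟨k', hk', rfl⟩
      rcases ih k' hk' with ⟨h1, h2⟩
      refine ⟨by simpa using h1, ?_⟩
      intro j hj
      cases j with
      | zero => simpa [List.isPrefixOf_iff_prefix] using hp
      | succ j' => simpa using h2 j' (by omega)

theorem pvFind_eq_firstOcc (l sep : List Char) (_hsep : sep ≠ []) :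
    PySem.Chars.find l sep = (match pvFirstOcc sep l with | none => (-1 : Int) | some k => (k : Int)) := by
  cases hocc : pvFirstOcc sep l with
  | none =>
    simp only []
    exact (PySem.Chars.find_eq_neg_one_iff l sep).mpr ((pvFirstOcc_none_iff sep l).mp hocc)
  | some k =>
    rcases pvFirstOcc_some sep l k hocc with ⟨h1, h2⟩
    have hne : PySem.Chars.find l sep ≠ -1 := by
      rw [PySem.Chars.find_ne_neg_one_iff]
      exact (h1.isInfix).trans (List.drop_suffix k l).isInfix
    have hge : 0 ≤ PySem.Chars.find l sep := by
      have := PySem.Chars.neg_one_le_find l sep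
      omega
    rcases PySem.Chars.find_spec hge with ⟨hpre, hmin⟩
    have hkn : (PySem.Chars.find l sep).toNat = k := by
      by_contra hne2
      rcases Nat.lt_or_ge (PySem.Chars.find l sep).toNat k with hlt | hge2
      · exact h2 _ hlt hpre
      · exact hmin k (by omega) h1
    simp only []
    omega

theorem pvPrefix_of_prefix_append (x y s : List Char) (h : s <+: x ++ y)
    (hl : s.length ≤ x.length) : s <+: x := by
  rw [List.prefix_iff_eq_take] at h ⊢
  rw [h, List.take_append_of_le_length hl]
  simp [List.length_take, Nat.min_eq_left hl]

-- first occurrence in l ++ c :: t when sep does not occur in l and c is not a character of sep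
theorem pvFirstOcc_append_sep (sep l t : List Char) (c : Char) (hsep : sep ≠ [])
    (hni : ¬ sep <:+: l) (hc : c ∉ sep) :
    pvFirstOcc sep (l ++ c :: t) = (pvFirstOcc sep t).map (· + l.length + 1) := by
  induction l with
  | nil =>
    simp only [List.nil_append, pvFirstOcc]
    have hp : ¬ sep.isPrefixOf (c :: t) := by
      rw [List.isPrefixOf_iff_prefix]
      intro hpre
      cases sep with
      | nil => exact hsep rfl
      | cons s0 stl =>
        rw [List.cons_prefix_cons] at hpre
        exact hc (hpre.1 ▸ List.mem_cons_self)
    simp [hp]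
  | cons a l' ih =>
    have hni' : ¬ sep <:+: l' := fun h => hni (List.infix_cons h)
    have hp : ¬ sep.isPrefixOf (a :: l' ++ c :: t) := by
      rw [List.isPrefixOf_iff_prefix]
      intro hpre
      by_cases hlen : sep.length ≤ l'.length + 1
      · exact hni (List.IsPrefix.isInfix
          (pvPrefix_of_prefix_append (a :: l') (c :: t) sep hpre (by simpa using hlen)))
      · apply hc
        have hi : l'.length + 1 < sep.length := by omega
        have hg : ((a :: l') ++ (c :: t))[l'.length + 1]'(by simp) = c := by
          rw [List.getElem_append_right (by simp)]
          simp
        have heq := (hpre.getElem hi).trans hg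
        exact heq ▸ List.getElem_mem hi
    simp only [List.cons_append, pvFirstOcc]
    have hp2 : ¬ sep <+: a :: (l' ++ c :: t) := by
      intro h; exact hp (List.isPrefixOf_iff_prefix.mpr h)
    rw [if_neg (by rw [List.isPrefixOf_iff_prefix]; exact hp2), ih hni']
    cases pvFirstOcc sep t
    · simp
    · simp; omega

-- first occurrence of the newline in a ++ '\n' :: t where a has no newline
theorem pvFirstOcc_newline (a t : List Char) (ha : '\n' ∉ a) :
    pvFirstOcc ['\n'] (a ++ '\n' :: t) = some a.length := by
  induction a with
  | nil => simp [pvFirstOcc]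
  | cons x a' ih =>
    have hx : x ≠ '\n' := fun h => ha (h ▸ List.mem_cons_self)
    have ha' : '\n' ∉ a' := fun h => ha (List.mem_cons_of_mem _ h)
    simp only [List.cons_append, pvFirstOcc]
    rw [if_neg, ih ha']
    · simp
    · rw [List.isPrefixOf_iff_prefix]
      intro hpre
      rw [List.cons_prefix_cons] at hpre
      exact hx hpre.1.symm

theorem pvFirstOcc_none_of_not_mem (s : List Char) (c : Char) (h : c ∉ s) :
    pvFirstOcc [c] s = none := by
  rw [pvFirstOcc_none_iff, List.singleton_infix_iff]
  exact h

-- an occurrence inside the left part of an append is the global first occurrence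
theorem pvFirstOcc_append_left (sep l t : List Char) (hsep : sep ≠ []) (k : Nat)
    (h : pvFirstOcc sep l = some k) : pvFirstOcc sep (l ++ t) = some k := by
  induction l generalizing k with
  | nil =>
    simp [pvFirstOcc, List.isPrefixOf_iff_prefix, hsep] at h
  | cons c rest ih =>
    rw [List.cons_append]
    simp only [pvFirstOcc] at h ⊢
    by_cases hp : sep.isPrefixOf (c :: rest)
    · rw [if_pos hp] at h
      have hpp : sep <+: c :: (rest ++ t) := by
        have := (List.isPrefixOf_iff_prefix.mp hp).trans (List.prefix_append (c :: rest) t)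
        simpa using this
      rw [if_pos (List.isPrefixOf_iff_prefix.mpr hpp)]
      exact h
    · rw [if_neg hp] at h
      rcases Option.map_eq_some_iff.mp h with ⟨k', hk', rfl⟩
      have hlen : sep.length ≤ rest.length + 1 := by
        have h1 := (pvFirstOcc_some sep (c :: rest) (k' + 1)
          (by simp only [pvFirstOcc]; rw [if_neg hp, hk']; rfl)).1
        have h2 := h1.length_le
        simp at h2
        omega
      have hp2 : ¬ sep.isPrefixOf (c :: (rest ++ t)) := by
        rw [List.isPrefixOf_iff_prefix]
        intro hpre
        apply hp
        rw [List.isPrefixOf_iff_prefix]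
        exact pvPrefix_of_prefix_append (c :: rest) t sep (by simpa using hpre) (by simpa using hlen)
      rw [if_neg hp2, ih k' hk']
      simp

-- reference splitter for a nonempty separator s0 :: stl
def pvSplit (s0 : Char) (stl : List Char) (l : List Char) : List (List Char) :=
  match h : pvFirstOcc (s0 :: stl) l with
  | none => [l]
  | some k => l.take k :: pvSplit s0 stl (l.drop (k + stl.length + 1))
termination_by l.length
decreasing_by
  have h1 : (s0 :: stl) <+: l.drop k := (pvFirstOcc_some _ _ _ h).1
  have h2 : l.drop k ≠ [] := by
    intro he; rw [he] at h1; simp [List.prefix_nil] at h1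
  have h3 : k < l.length := by
    by_contra hk
    exact h2 (List.drop_eq_nil_of_le (by omega))
  simp only [List.length_drop]
  omega

theorem pvSplit_none (s0 : Char) (stl l : List Char)
    (h : pvFirstOcc (s0 :: stl) l = none) : pvSplit s0 stl l = [l] := by
  rw [pvSplit]
  split
  · rfl
  · rename_i k hk; rw [h] at hk; cases hk

theorem pvSplit_some (s0 : Char) (stl l : List Char) (k : Nat)
    (h : pvFirstOcc (s0 :: stl) l = some k) :
    pvSplit s0 stl l = l.take k :: pvSplit s0 stl (l.drop (k + stl.length + 1)) := by
  rw [pvSplit]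
  split
  · rename_i hk; rw [h] at hk; cases hk
  · rename_i k' hk; rw [h] at hk; cases hk; rfl

theorem pvSplitOn_go (s0 : Char) (stl : List Char) :
    ∀ (fuel : Nat) (l cur : List Char) (acc : List (List Char)), l.length < fuel →
    PySem.Chars.splitOn.go (s0 :: stl) fuel l cur acc
      = acc.reverse ++ List.modifyHead (fun x => cur.reverse ++ x) (pvSplit s0 stl l) := by
  intro fuel
  induction fuel with
  | zero => intro l cur acc h; omega
  | succ f ih =>
    intro l cur acc h
    cases l with
    | nil =>
      have hgo : PySem.Chars.splitOn.go (s0 :: stl) (f + 1) [] cur acc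
          = (cur.reverse :: acc).reverse := by
        rw [PySem.Chars.splitOn.go]; omega
      rw [hgo, pvSplit]
      simp [pvFirstOcc]
    | cons c rest =>
      have hgo : PySem.Chars.splitOn.go (s0 :: stl) (f + 1) (c :: rest) cur acc
          = if (s0 :: stl).isPrefixOf (c :: rest) then
              PySem.Chars.splitOn.go (s0 :: stl) f (List.drop (s0 :: stl).length (c :: rest)) [] (cur.reverse :: acc)
            else PySem.Chars.splitOn.go (s0 :: stl) f rest (c :: cur) acc := by
        rw [PySem.Chars.splitOn.go]
      rw [hgo]
      by_cases hp : (s0 :: stl).isPrefixOf (c :: rest)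
      · rw [if_pos hp]
        rw [ih _ _ _ (by simp at h ⊢; omega)]
        have hocc : pvFirstOcc (s0 :: stl) (c :: rest) = some 0 := by
          simp [pvFirstOcc, hp]
        rw [pvSplit_some s0 stl _ 0 hocc]
        simp only [List.length_cons, Nat.zero_add, List.drop_succ_cons, List.take_zero]
        cases pvSplit s0 stl (List.drop stl.length rest) <;> simp
      · rw [if_neg hp]
        rw [ih _ _ _ (by simp at h ⊢; omega)]
        cases hocc : pvFirstOcc (s0 :: stl) rest with
        | none =>
          rw [pvSplit_none s0 stl rest hocc,
              pvSplit_none s0 stl (c :: rest) (by simp [pvFirstOcc, hp, hocc])]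
          simp
        | some k =>
          rw [pvSplit_some s0 stl rest k hocc,
              pvSplit_some s0 stl (c :: rest) (k + 1) (by simp [pvFirstOcc, hp, hocc])]
          simp only [List.drop_succ_cons, List.take_succ_cons, List.modifyHead_cons]
          rw [show k + 1 + stl.length = k + stl.length + 1 by omega]
          simp

theorem pvSplitOn_eq (s0 : Char) (stl l : List Char) :
    PySem.Chars.splitOn l (s0 :: stl) = pvSplit s0 stl l := by
  rw [PySem.Chars.splitOn, pvSplitOn_go s0 stl (l.length + 1) l [] [] (by omega)]
  cases pvSplit s0 stl l <;> simp [List.modifyHead]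

-- splitOnMax.go with maxsplit exhausted returns the remainder as one piece
theorem pvSplitOnMax_go0 (sep : List Char) :
    ∀ (fuel : Nat) (l cur : List Char) (acc : List (List Char)),
    PySem.Chars.splitOnMax.go sep fuel 0 l cur acc = acc.reverse ++ [cur.reverse ++ l] := by
  intro fuel l cur acc
  cases fuel with
  | zero => rw [PySem.Chars.splitOnMax.go]; simp
  | succ f =>
    cases l with
    | nil =>
      have hgo : PySem.Chars.splitOnMax.go sep (f + 1) 0 [] cur acc
          = (cur.reverse :: acc).reverse := by
        rw [PySem.Chars.splitOnMax.go]; omega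
      rw [hgo]; simp
    | cons c rest =>
      have hgo : PySem.Chars.splitOnMax.go sep (f + 1) 0 (c :: rest) cur acc
          = ((cur.reverse ++ (c :: rest)) :: acc).reverse := by
        rw [PySem.Chars.splitOnMax.go]; simp
      rw [hgo]; simp

theorem pvSplitOnMax_go1 (s0 : Char) (stl : List Char) :
    ∀ (fuel : Nat) (l cur : List Char) (acc : List (List Char)), l.length < fuel →
    PySem.Chars.splitOnMax.go (s0 :: stl) fuel 1 l cur acc
      = acc.reverse ++ (match pvFirstOcc (s0 :: stl) l with
          | none => [cur.reverse ++ l]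
          | some k => [cur.reverse ++ l.take k, l.drop (k + stl.length + 1)]) := by
  intro fuel
  induction fuel with
  | zero => intro l cur acc h; omega
  | succ f ih =>
    intro l cur acc h
    cases l with
    | nil =>
      have hgo : PySem.Chars.splitOnMax.go (s0 :: stl) (f + 1) 1 [] cur acc
          = (cur.reverse :: acc).reverse := by
        rw [PySem.Chars.splitOnMax.go]; omega
      rw [hgo]
      simp [pvFirstOcc]
    | cons c rest =>
      have hgo : PySem.Chars.splitOnMax.go (s0 :: stl) (f + 1) 1 (c :: rest) cur acc
          = if (s0 :: stl).isPrefixOf (c :: rest) then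
              PySem.Chars.splitOnMax.go (s0 :: stl) f 0 (List.drop (s0 :: stl).length (c :: rest)) [] (cur.reverse :: acc)
            else PySem.Chars.splitOnMax.go (s0 :: stl) f 1 rest (c :: cur) acc := by
        rw [PySem.Chars.splitOnMax.go]
        simp
      rw [hgo]
      by_cases hp : (s0 :: stl).isPrefixOf (c :: rest)
      · rw [if_pos hp, pvSplitOnMax_go0]
        have hocc : pvFirstOcc (s0 :: stl) (c :: rest) = some 0 := by
          simp [pvFirstOcc, hp]
        rw [hocc]
        simp
      · rw [if_neg hp, ih _ _ _ (by simp at h ⊢; omega)]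
        cases hocc : pvFirstOcc (s0 :: stl) rest with
        | none =>
          rw [show pvFirstOcc (s0 :: stl) (c :: rest) = none by simp [pvFirstOcc, hp, hocc]]
          simp
        | some k =>
          rw [show pvFirstOcc (s0 :: stl) (c :: rest) = some (k + 1) by simp [pvFirstOcc, hp, hocc]]
          simp [List.drop_succ_cons, List.take_succ_cons]
          omega

theorem pvSplitOnMax_eq (s0 : Char) (stl l : List Char) :
    PySem.Chars.splitOnMax l (s0 :: stl) 1
      = (match pvFirstOcc (s0 :: stl) l with
          | none => [l]
          | some k => [l.take k, l.drop (k + stl.length + 1)]) := by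
  rw [PySem.Chars.splitOnMax]
  rw [if_neg (by omega)]
  simp only [Int.toNat_one]
  rw [pvSplitOnMax_go1 s0 stl (l.length + 1) l [] [] (by omega)]
  cases pvFirstOcc (s0 :: stl) l <;> simp

-- what A appends for one line
def pvLine (l : List Char) : List String :=
  match pvFirstOcc ['[', ' ', ']', ' '] l with
  | none => []
  | some k =>
    [String.ofList (PySem.Chars.strip
      (match pvFirstOcc [' ', '['] (l.drop (k + 4)) with
        | none => l.drop (k + 4)
        | some k2 => (l.drop (k + 4)).take k2))]

-- A's loop body on one line, in terms of pvLine
theorem pvToList_marker : ("[ ] " : String).toList = ['[', ' ', ']', ' '] := by decide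

theorem pvToList_open : ("[ ]" : String).toList = ['[', ' ', ']'] := by decide

theorem pvToList_sqopen : (" [" : String).toList = [' ', '['] := by decide

-- Str.splitMax? line "[ ] " 1, computed
theorem pvPartsA (line : String) :
    ∃ P, PySem.Str.splitMax? line "[ ] " 1 = some P ∧
      P.map String.toList = (match pvFirstOcc ['[', ' ', ']', ' '] line.toList with
        | none => [line.toList]
        | some k => [line.toList.take k, line.toList.drop (k + 4)]) := by
  have hmap := PySem.Str.splitMax?_map line "[ ] " 1
  rw [pvToList_marker] at hmap
  rw [PySem.Chars.splitMax?] at hmap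
  rw [if_neg (by simp)] at hmap
  rw [pvSplitOnMax_eq '[' [' ', ']', ' '] line.toList] at hmap
  cases hs : PySem.Str.splitMax? line "[ ] " 1 with
  | none => rw [hs] at hmap; cases pvFirstOcc ['[', ' ', ']', ' '] line.toList <;> simp_all
  | some P =>
    rw [hs] at hmap
    refine ⟨P, rfl, ?_⟩
    cases hocc : pvFirstOcc ['[', ' ', ']', ' '] line.toList <;> rw [hocc] at hmap <;>
      simpa using hmap

theorem pvStepA (out : List String) (line : String) :
    (if PySem.Str.isIn "[ ]" line then
        let parts := (PySem.Str.splitMax? line "[ ] " 1).getD []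
        if 1 < parts.length then
          out ++ [PySem.Str.strip
            (((PySem.List.pyGet? ((PySem.Str.split? ((PySem.List.pyGet? parts 1).getD "") " [").getD []) 0).getD ""))]
        else out
      else out) = out ++ pvLine line.toList := by
  rcases pvPartsA line with ⟨P, hP, hPm⟩
  cases hocc : pvFirstOcc ['[', ' ', ']', ' '] line.toList with
  | none =>
    rw [hocc] at hPm
    have hP1 : P.length = 1 := by
      have := congrArg List.length hPm; simpa using this
    simp only [pvLine, hocc]
    by_cases hin : PySem.Str.isIn "[ ]" line
    · rw [if_pos hin]; simp [hP, hP1]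
    · rw [if_neg hin]; simp
  | some k =>
    rw [hocc] at hPm
    -- the guard is true: the marker occurs in the line, hence "[ ]" does
    have hinf : ['[', ' ', ']', ' '] <:+: line.toList :=
      ((pvFirstOcc_some _ _ _ hocc).1.isInfix).trans (List.drop_suffix k line.toList).isInfix
    have hin : PySem.Str.isIn "[ ]" line = true := by
      rw [PySem.Str.isIn_eq, pvToList_open, PySem.Chars.isIn_iff_infix]
      exact List.IsInfix.trans ⟨[], [' '], by simp⟩ hinf
    obtain ⟨p0, p1, rfl⟩ : ∃ p0 p1, P = [p0, p1] := by
      cases P with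
      | nil => simp at hPm
      | cons a Q =>
        cases Q with
        | nil => simp at hPm
        | cons b Q' =>
          cases Q' with
          | nil => exact ⟨a, b, rfl⟩
          | cons c Q'' => simp at hPm
    have hp1 : p1.toList = line.toList.drop (k + 4) := by
      have := (by simpa using hPm : p0.toList = line.toList.take k ∧ p1.toList = line.toList.drop (k + 4))
      exact this.2
    have hmap2 := PySem.Str.split?_map p1 " ["
    rw [pvToList_sqopen, PySem.Chars.split?] at hmap2
    rw [if_neg (by simp)] at hmap2
    rw [pvSplitOn_eq ' ' ['['] p1.toList] at hmap2
    simp only [pvLine, hocc, hin, if_true, hP]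
    have hget1 : PySem.List.pyGet? [p0, p1] (1 : Int) = some p1 := by
      simp [PySem.List.pyGet?, PySem.List.pyIdx?]
    cases hocc2 : pvFirstOcc [' ', '['] (line.toList.drop (k + 4)) with
    | none =>
      rw [pvSplit_none ' ' ['['] p1.toList (by rw [hp1]; exact hocc2)] at hmap2
      obtain ⟨r0, hr, hr0⟩ : ∃ r0, PySem.Str.split? p1 " [" = some [r0] ∧ r0.toList = p1.toList := by
        cases hs : PySem.Str.split? p1 " [" with
        | none => rw [hs] at hmap2; simp at hmap2
        | some R =>
          rw [hs] at hmap2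
          cases R with
          | nil => simp at hmap2
          | cons r R' =>
            cases R' with
            | nil => exact ⟨r, rfl, by simpa using hmap2⟩
            | cons r2 R'' => simp at hmap2
      have hget0 : PySem.List.pyGet? [r0] (0 : Int) = some r0 := by
        simp [PySem.List.pyGet?, PySem.List.pyIdx?]
      simp only [hget1, Option.getD_some, hr, hget0]
      have hfin : PySem.Str.strip r0
          = String.ofList (PySem.Chars.strip (line.toList.drop (k + 4))) := by
        rw [← String.toList_inj, PySem.Str.toList_strip, hr0, hp1]
        simp
      simp [hfin]
    | some k2 =>
      rw [pvSplit_some ' ' ['['] p1.toList k2 (by rw [hp1]; exact hocc2)] at hmap2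
      obtain ⟨r0, R', hr, hr0⟩ : ∃ r0 R', PySem.Str.split? p1 " [" = some (r0 :: R')
          ∧ r0.toList = p1.toList.take k2 := by
        cases hs : PySem.Str.split? p1 " [" with
        | none => rw [hs] at hmap2; simp at hmap2
        | some R =>
          rw [hs] at hmap2
          cases R with
          | nil => simp at hmap2
          | cons r R' =>
            refine ⟨r, R', rfl, ?_⟩
            have := (by simpa using hmap2 :
              r.toList = p1.toList.take k2 ∧ R'.map String.toList
                = pvSplit ' ' ['['] (p1.toList.drop (k2 + 1 + 1)))
            exact this.1
      have hget0 : PySem.List.pyGet? (r0 :: R') (0 : Int) = some r0 := by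
        simp [PySem.List.pyGet?, PySem.List.pyIdx?]
      simp only [hget1, Option.getD_some, hr, hget0]
      have hfin : PySem.Str.strip r0
          = String.ofList (PySem.Chars.strip ((line.toList.drop (k + 4)).take k2)) := by
        rw [← String.toList_inj, PySem.Str.toList_strip, hr0, hp1]
        simp
      simp [hfin]

theorem pvFoldA (L : List String) (acc : List String) :
    L.foldl (fun out line =>
      if PySem.Str.isIn "[ ]" line then
        let parts := (PySem.Str.splitMax? line "[ ] " 1).getD []
        if 1 < parts.length then
          out ++ [PySem.Str.strip
            (((PySem.List.pyGet? ((PySem.Str.split? ((PySem.List.pyGet? parts 1).getD "") " [").getD []) 0).getD ""))]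
        else out
      else out) acc = acc ++ L.flatMap (fun line => pvLine line.toList) := by
  induction L generalizing acc with
  | nil => simp
  | cons x L' ih =>
    rw [List.foldl_cons, pvStepA, ih, List.flatMap_cons, List.append_assoc]

-- port A, reduced to the character level
theorem pvA_eq (s : String) :
    parse_open_reminders_py (some s)
      = (pvSplit '\n' [] s.toList).flatMap pvLine := by
  unfold parse_open_reminders_py
  have hmap := PySem.Str.split?_map s "\n"
  rw [show ("\n" : String).toList = ['\n'] by decide, PySem.Chars.split?,
      if_neg (by simp), pvSplitOn_eq '\n' [] s.toList] at hmap
  obtain ⟨L, hL, hLm⟩ : ∃ L, PySem.Str.split? s "\n" = some L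
      ∧ L.map String.toList = pvSplit '\n' [] s.toList := by
    cases hs : PySem.Str.split? s "\n" with
    | none => rw [hs] at hmap; simp at hmap
    | some L =>
      rw [hs, Option.map_some] at hmap
      exact ⟨L, rfl, Option.some.inj hmap⟩
  simp only [Option.getD_some, hL]
  rw [pvFoldA]
  rw [← hLm]
  simp [List.flatMap_map]

-- [] produces []
theorem pvAltLoop_nil : pvAltLoop [] = [] := by
  rw [pvAltLoop]
  rw [dif_pos (by decide)]

-- unfold pvAltLoop at a marker occurrence, phrased with pvFirstOcc
theorem pvAltLoop_pos (s : List Char) (k : Nat)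
    (h : pvFirstOcc ['[', ' ', ']', ' '] s = some k) :
    pvAltLoop s =
      (let s' := s.drop (k + 4)
       let line := match pvFirstOcc ['\n'] s' with
         | none => s'
         | some j => s'.take j
       String.ofList (PySem.Chars.strip
         (match pvFirstOcc [' ', '['] line with
           | none => line
           | some k2 => line.take k2)) :: pvAltLoop (s'.drop line.length)) := by
  rw [pvAltLoop]
  dsimp only
  rw [show PySem.Chars.find s ['[', ' ', ']', ' '] = (k : Int) from by
    rw [pvFind_eq_firstOcc _ _ (by simp), h]]
  rw [dif_neg (by omega)]
  simp only [Int.toNat_natCast]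
  cases hocc2 : pvFirstOcc ['\n'] (s.drop (k + 4)) with
  | none =>
    rw [show PySem.Chars.find (s.drop (k + 4)) ['\n'] = -1 from by
      rw [pvFind_eq_firstOcc _ _ (by simp), hocc2]]
    rw [if_pos rfl]
    cases hocc3 : pvFirstOcc [' ', '['] (s.drop (k + 4)) with
    | none =>
      rw [show PySem.Chars.find (s.drop (k + 4)) [' ', '['] = -1 from by
        rw [pvFind_eq_firstOcc _ _ (by simp), hocc3]]
      simp
    | some k2 =>
      rw [show PySem.Chars.find (s.drop (k + 4)) [' ', '['] = (k2 : Int) from by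
        rw [pvFind_eq_firstOcc _ _ (by simp), hocc3]]
      have hk2 : ¬ ((k2 : Int) = -1) := by omega
      simp only [if_neg hk2, Int.toNat_natCast]
  | some j =>
    rw [show PySem.Chars.find (s.drop (k + 4)) ['\n'] = (j : Int) from by
      rw [pvFind_eq_firstOcc _ _ (by simp), hocc2]]
    have hj : ¬ ((j : Int) = -1) := by omega
    simp only [if_neg hj, Int.toNat_natCast]
    cases hocc3 : pvFirstOcc [' ', '['] ((s.drop (k + 4)).take j) with
    | none =>
      rw [show PySem.Chars.find ((s.drop (k + 4)).take j) [' ', '['] = -1 from by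
        rw [pvFind_eq_firstOcc _ _ (by simp), hocc3]]
      simp
    | some k2 =>
      rw [show PySem.Chars.find ((s.drop (k + 4)).take j) [' ', '['] = (k2 : Int) from by
        rw [pvFind_eq_firstOcc _ _ (by simp), hocc3]]
      have hk2 : ¬ ((k2 : Int) = -1) := by omega
      simp only [if_neg hk2, Int.toNat_natCast]

-- no marker: result is empty
theorem pvAltLoop_neg (s : List Char)
    (h : pvFirstOcc ['[', ' ', ']', ' '] s = none) : pvAltLoop s = [] := by
  rw [pvAltLoop]
  rw [dif_pos (by rw [pvFind_eq_firstOcc s ['[', ' ', ']', ' '] (by simp), h])]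

-- B skips text before a marker-free line
theorem pvAltLoop_skip (l t : List Char) (hni : ¬ ['[', ' ', ']', ' '] <:+: l) :
    pvAltLoop (l ++ '\n' :: t) = pvAltLoop t := by
  have happ := pvFirstOcc_append_sep ['[', ' ', ']', ' '] l t '\n' (by simp) hni (by decide)
  cases hocc : pvFirstOcc ['[', ' ', ']', ' '] t with
  | none =>
    rw [hocc] at happ
    rw [pvAltLoop_neg _ (by simpa using happ), pvAltLoop_neg _ hocc]
  | some k =>
    rw [hocc] at happ
    simp only [Option.map_some] at happ
    rw [pvAltLoop_pos _ _ happ, pvAltLoop_pos _ _ hocc]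
    dsimp only
    have hdrop : (l ++ '\n' :: t).drop (k + l.length + 1 + 4) = t.drop (k + 4) := by
      rw [show k + l.length + 1 + 4 = l.length + (k + 5) by omega,
          List.drop_length_add_append]
      simp [List.drop_succ_cons]
    rw [hdrop]

-- B handles a line carrying a marker
theorem pvAltLoop_line (l t : List Char) (k : Nat) (hnl : '\n' ∉ l)
    (hk : pvFirstOcc ['[', ' ', ']', ' '] l = some k) :
    pvAltLoop (l ++ '\n' :: t) = pvLine l ++ pvAltLoop t := by
  have hk4 : k + 4 ≤ l.length := by
    have h1 := (pvFirstOcc_some _ _ _ hk).1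
    have := h1.length_le
    simp at this
    omega
  rw [pvAltLoop_pos _ k (pvFirstOcc_append_left _ _ _ (by simp) k hk)]
  dsimp only
  have hdrop : (l ++ '\n' :: t).drop (k + 4) = l.drop (k + 4) ++ '\n' :: t :=
    List.drop_append_of_le_length hk4
  have hnl' : '\n' ∉ l.drop (k + 4) := fun hm => hnl (List.mem_of_mem_drop hm)
  rw [hdrop, pvFirstOcc_newline _ _ hnl']
  simp only [List.take_left, List.drop_left]
  have hskip : pvAltLoop ('\n' :: t) = pvAltLoop t := by
    have := pvAltLoop_skip [] t (by decide)
    simpa using this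
  rw [hskip, pvLine, hk]
  rfl

-- B on a final line without newline
theorem pvAltLoop_last (l : List Char) (hnl : '\n' ∉ l) :
    pvAltLoop l = pvLine l := by
  cases hocc : pvFirstOcc ['[', ' ', ']', ' '] l with
  | none => rw [pvAltLoop_neg _ hocc, pvLine, hocc]
  | some k =>
    rw [pvAltLoop_pos _ k hocc]
    dsimp only
    have hnl' : '\n' ∉ l.drop (k + 4) := fun hm => hnl (List.mem_of_mem_drop hm)
    rw [pvFirstOcc_none_of_not_mem _ _ hnl']
    simp only [List.drop_length]
    rw [pvAltLoop_nil, pvLine, hocc]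

theorem pvB_eq (s : List Char) :
    pvAltLoop s = (pvSplit '\n' [] s).flatMap pvLine := by
  induction hn : s.length using Nat.strong_induction_on generalizing s with
  | _ n ih =>
  cases hocc : pvFirstOcc ['\n'] s with
  | none =>
    have hnl : '\n' ∉ s := by
      have := (pvFirstOcc_none_iff ['\n'] s).mp hocc
      rw [List.singleton_infix_iff] at this
      exact this
    rw [pvSplit_none _ _ _ hocc, pvAltLoop_last s hnl]
    simp
  | some p =>
    have hps := pvFirstOcc_some _ _ _ hocc
    have hp : p < s.length := by
      have h1 := hps.1
      have h2 : s.drop p ≠ [] := by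
        intro he; rw [he] at h1; simp [List.prefix_nil] at h1
      by_contra hc
      exact h2 (List.drop_eq_nil_of_le (by omega))
    have hgp : s[p] = '\n' := by
      have h1 := hps.1
      rw [List.drop_eq_getElem_cons hp] at h1
      rw [List.cons_prefix_cons] at h1
      exact h1.1.symm
    have hnl : '\n' ∉ s.take p := by
      intro hm
      rcases List.mem_take_iff_getElem.mp hm with ⟨j, hj, hje⟩
      apply hps.2 j (by omega)
      rw [List.drop_eq_getElem_cons (by omega), hje]
      simp
    have hsplit : s = s.take p ++ '\n' :: s.drop (p + 1) := by
      conv_lhs => rw [← List.take_append_drop p s]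
      rw [List.drop_eq_getElem_cons hp, hgp]
    rw [pvSplit_some '\n' [] s p hocc]
    simp only [List.length_nil, Nat.add_zero]
    rw [List.flatMap_cons]
    cases hocc2 : pvFirstOcc ['[', ' ', ']', ' '] (s.take p) with
    | none =>
      conv_lhs => rw [hsplit]
      rw [pvAltLoop_skip _ _ ((pvFirstOcc_none_iff _ _).mp hocc2)]
      rw [ih (s.drop (p + 1)).length (by simp; omega) _ rfl]
      rw [pvLine, hocc2]
      simp
    | some k =>
      conv_lhs => rw [hsplit]
      rw [pvAltLoop_line _ _ k hnl hocc2]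
      rw [ih (s.drop (p + 1)).length (by simp; omega) _ rfl]

-- ===== VERDICT (by name: the statement is the Claim_ definition above) =====
theorem parse_open_reminders_py_spec : Claim_equal_parse_open_reminders_py := by
  intro rt _
  unfold Spec_parse_open_reminders_py
  have hsome : ∀ s : String,
      parse_open_reminders_py (some s) = parse_open_reminders_py_alt (some s) := by
    intro s
    rw [pvA_eq s]
    unfold parse_open_reminders_py_alt
    simp only [Option.getD_some]
    rw [pvB_eq s.toList]
  cases rt with
  | none =>
    show parse_open_reminders_py none = parse_open_reminders_py_alt none
    have h1 : parse_open_reminders_py none = parse_open_reminders_py (some "") := rfl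
    have h2 : parse_open_reminders_py_alt none = parse_open_reminders_py_alt (some "") := rfl
    rw [h1, h2, hsome]
  | some s => exact hsome s
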